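-- pv_equiv track=rewrite | github.com/utguang/Clade3-NosZ | monomer2dimer.py | replicate_sequences
-- ===== SOURCE A (Python) =====
-- def replicate_sequences(file_lines):
--     formatted_sequences = []
--     current_seq_id = ""
--     current_sequence = []
--
--     for line in file_lines:
--         if line.startswith('>'):
--             if current_seq_id and current_sequence:
--                 sequence = ''.join(current_sequence)
--                 formatted_sequences.append(current_seq_id)
--                 formatted_sequences.append(f"{sequence}:{sequence}")
--             current_seq_id = line.strip()
--             current_sequence = []
--         else:
--             current_sequence.append(line.strip())
--
--     # Add the last sequence to the list
--     if current_seq_id and current_sequence: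
--         sequence = ''.join(current_sequence)
--         formatted_sequences.append(current_seq_id)
--         formatted_sequences.append(f"{sequence}:{sequence}")
--
--     return formatted_sequences
-- ===== SOURCE B (Python) =====
-- def replicate_sequences(file_lines):
--     # pass 1: group the lines into (header, body_lines) records; lines before
--     # the first header are dropped
--     records = []
--     for line in file_lines:
--         if line.startswith('>'):
--             records.append((line.strip(), []))
--         elif records:
--             records[-1][1].append(line.strip())
--     # pass 2: format each record that has at least one body line
--     out = []
--     for header, body in records:
--         if body:
--             seq = ''.join(body)
--             out.append(header)
--             out.append(f"{seq}:{seq}")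
--     return out
-- ===== Notes on version B (the rewrite author's own statement) =====
-- stated objective: simpler
-- what changed: Replaces A's one-pass loop with duplicated flush-on-header/flush-at-end blocks and three pieces of mutable state by a two-phase pipeline: first group lines into (header, body_lines) records, then format the records with body lines in a second pass.
import Mathlib
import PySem

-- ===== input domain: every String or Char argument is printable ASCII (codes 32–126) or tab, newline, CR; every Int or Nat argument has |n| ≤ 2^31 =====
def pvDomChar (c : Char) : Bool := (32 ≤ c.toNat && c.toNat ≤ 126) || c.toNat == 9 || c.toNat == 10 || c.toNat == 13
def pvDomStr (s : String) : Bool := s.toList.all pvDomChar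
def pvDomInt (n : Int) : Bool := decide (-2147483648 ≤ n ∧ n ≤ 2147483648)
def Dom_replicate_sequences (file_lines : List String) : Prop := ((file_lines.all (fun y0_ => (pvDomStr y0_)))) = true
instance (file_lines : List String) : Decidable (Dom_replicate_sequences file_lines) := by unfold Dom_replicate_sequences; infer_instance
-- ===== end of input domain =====

-- B is a simpler two-phase pipeline (group lines into records, then format); same return value as A.

-- shared output formatting: f"{seq}:{seq}" with seq = ''.join(parts)
def pvDup (parts : List String) : String :=
  let s := PySem.Str.join "" parts
  s ++ ":" ++ s

-- ===== PORT A =====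
-- A's loop body: state = (formatted_sequences, current_seq_id, current_sequence)
def pvStepA (st : List String × String × List String) (line : String) :
    List String × String × List String :=
  if PySem.Str.startswith line ">" then
    (if st.2.1 ≠ "" ∧ st.2.2 ≠ [] then st.1 ++ [st.2.1, pvDup st.2.2] else st.1,
     PySem.Str.strip line, [])
  else
    (st.1, st.2.1, st.2.2 ++ [PySem.Str.strip line])

def replicate_sequences (file_lines : List String) : List String :=
  let st := file_lines.foldl pvStepA ([], "", [])
  if st.2.1 ≠ "" ∧ st.2.2 ≠ [] then st.1 ++ [st.2.1, pvDup st.2.2] else st.1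

-- ===== PORT B =====
-- pass 1 body: a header begins a new record, otherwise the line joins the last record's body
def pvStepRec (recs : List (String × List String)) (line : String) :
    List (String × List String) :=
  if PySem.Str.startswith line ">" then
    recs ++ [(PySem.Str.strip line, [])]
  else
    match recs.getLast? with
    | none => recs
    | some r => recs.dropLast ++ [(r.1, r.2 ++ [PySem.Str.strip line])]

-- pass 2 body: emit header and seq:seq for a record with a non-empty body
def pvEmit (out : List String) (r : String × List String) : List String :=
  if r.2 ≠ [] then out ++ [r.1, pvDup r.2] else out

def replicate_sequences_alt (file_lines : List String) : List String :=
  (file_lines.foldl pvStepRec []).foldl pvEmit []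

-- ===== PRECONDITION & SPEC =====
def Spec_replicate_sequences (file_lines : List String) (out : List String) : Prop := out = replicate_sequences_alt file_lines
instance (file_lines : List String) (out : List String) : Decidable (Spec_replicate_sequences file_lines out) := by unfold Spec_replicate_sequences; infer_instance

-- ===== CLAIM (what is proved, stated in full; the proofs are below) =====
def Claim_equal_replicate_sequences : Prop := ∀ (file_lines : List String), Dom_replicate_sequences file_lines → Spec_replicate_sequences file_lines (replicate_sequences file_lines)

-- ===== LEMMAS AND PROOFS =====

-- B's second pass, as a function of the record list
def pvFmt (recs : List (String × List String)) : List String := recs.foldl pvEmit []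

theorem pvFmt_eq_flatMap (recs : List (String × List String)) (acc : List String) :
    recs.foldl pvEmit acc
      = acc ++ recs.flatMap (fun r => if r.2 ≠ [] then [r.1, pvDup r.2] else []) := by
  have h : pvEmit = fun out r => out ++ (if r.2 ≠ [] then [r.1, pvDup r.2] else []) := by
    funext out r
    by_cases h2 : r.2 = [] <;> simp [pvEmit, h2]
  rw [h, PySem.List.foldl_append_eq_flatMap]

theorem pvFmt_append (a b : List (String × List String)) :
    pvFmt (a ++ b) = pvFmt a ++ pvFmt b := by
  simp [pvFmt, pvFmt_eq_flatMap]

-- pass 1 never touches already-closed records: they can be split off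
theorem pvStepRec_split (lines : List String) (pre cur : List (String × List String))
    (h : cur ≠ []) :
    lines.foldl pvStepRec (pre ++ cur) = pre ++ lines.foldl pvStepRec cur := by
  induction lines generalizing cur with
  | nil => simp
  | cons l ls ih =>
    simp only [List.foldl_cons]
    by_cases hs : PySem.Str.startswith l ">" = true
    · have hs' : PySem.Chars.startswith l.toList ['>'] = true := by
        simpa [PySem.Str.startswith] using hs
      rw [show pvStepRec (pre ++ cur) l = pre ++ (cur ++ [(PySem.Str.strip l, [])]) by
        simp [pvStepRec, hs']]
      rw [show pvStepRec cur l = cur ++ [(PySem.Str.strip l, [])] by simp [pvStepRec, hs']]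
      exact ih _ (by simp)
    · have hs' : PySem.Chars.startswith l.toList ['>'] = false := by
        simpa [PySem.Str.startswith] using hs
      have hc : cur.getLast? = some (cur.getLast h) := List.getLast?_eq_some_getLast h
      have hlast : (pre ++ cur).getLast? = some (cur.getLast h) := by
        rw [List.getLast?_append_of_ne_nil (l₁ := pre) h]; exact hc
      have hdrop : (pre ++ cur).dropLast = pre ++ cur.dropLast :=
        List.dropLast_append_of_ne_nil h
      rw [show pvStepRec (pre ++ cur) l
            = pre ++ (cur.dropLast ++ [((cur.getLast h).1, (cur.getLast h).2 ++ [PySem.Str.strip l])]) by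
          simp [pvStepRec, hs', hlast, hdrop]]
      rw [show pvStepRec cur l
            = cur.dropLast ++ [((cur.getLast h).1, (cur.getLast h).2 ++ [PySem.Str.strip l])] by
        simp [pvStepRec, hs', hc]]
      exact ih _ (by simp)

-- a line starting with '>' strips to a non-empty string
theorem pvStrip_header_ne (line : String)
    (h : PySem.Str.startswith line ">" = true) : PySem.Str.strip line ≠ "" := by
  have h1 : ('>' : Char) ∈ line.toList := by
    simp only [PySem.Str.startswith, PySem.Chars.startswith] at h
    have := List.IsPrefix.mem (List.mem_singleton.mpr rfl)
      (List.isPrefixOf_iff_prefix.mp h)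
    simpa using this
  intro hcon
  have h2 : PySem.Chars.strip line.toList = [] := by
    have := congrArg String.toList hcon
    simpa [PySem.Str.strip] using this
  have h3 : ('>' : Char) ∈ PySem.Chars.lstrip line.toList := by
    simp only [PySem.Chars.lstrip]
    -- '>' is not a space, so it survives dropWhile: argue by membership in the list
    by_contra hno
    have hmem : ('>' : Char) ∈ line.toList.takeWhile PySem.Chars.isspace := by
      have : line.toList = line.toList.takeWhile PySem.Chars.isspace
          ++ line.toList.dropWhile PySem.Chars.isspace := (List.takeWhile_append_dropWhile).symm
      rw [this] at h1
      rcases List.mem_append.mp h1 with h' | h'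
      · exact h'
      · exact absurd h' hno
    have := List.mem_takeWhile_imp hmem
    simp [PySem.Chars.isspace] at this
  simp only [PySem.Chars.strip, PySem.Chars.rstrip] at h2
  have h4 : (PySem.Chars.lstrip line.toList).reverse.dropWhile PySem.Chars.isspace = [] := by
    have := congrArg List.reverse h2
    simpa using this
  have h5 := List.dropWhile_eq_nil_iff.mp h4 (x := '>') (by simpa using h3)
  simp [PySem.Chars.isspace] at h5

-- the record list that corresponds to A's (current_seq_id, current_sequence)
def pvRecs0 (id : String) (seq : List String) : List (String × List String) :=
  if id = "" then [] else [(id, seq)]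

-- main invariant: running A from any state equals acc ++ format of B's pass 1 from pvRecs0
theorem pv_main (lines : List String) (acc : List String) (id : String) (seq : List String) :
    (let st := lines.foldl pvStepA (acc, id, seq)
     if st.2.1 ≠ "" ∧ st.2.2 ≠ [] then st.1 ++ [st.2.1, pvDup st.2.2] else st.1)
      = acc ++ pvFmt (lines.foldl pvStepRec (pvRecs0 id seq)) := by
  induction lines generalizing acc id seq with
  | nil =>
    by_cases hid : id = ""
    · simp [hid, pvRecs0, pvFmt]
    · by_cases hseq : seq = [] <;>
        simp [hid, hseq, pvRecs0, pvFmt, pvEmit]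
  | cons l ls ih =>
    by_cases hs : PySem.Str.startswith l ">" = true
    · have hne := pvStrip_header_ne l hs
      have hs' : PySem.Chars.startswith l.toList ['>'] = true := by
        simpa [PySem.Str.startswith] using hs
      have hA : pvStepA (acc, id, seq) l
          = ((if id ≠ "" ∧ seq ≠ [] then acc ++ [id, pvDup seq] else acc),
             PySem.Str.strip l, []) := by simp [pvStepA, hs']
      have hB : pvStepRec (pvRecs0 id seq) l
          = pvRecs0 id seq ++ [(PySem.Str.strip l, [])] := by simp [pvStepRec, hs']
      simp only [List.foldl_cons, hA, hB]
      rw [ih, pvStepRec_split ls (pvRecs0 id seq) [(PySem.Str.strip l, [])] (by simp),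
        pvFmt_append]
      have hr : pvRecs0 (PySem.Str.strip l) [] = [(PySem.Str.strip l, [])] := by
        simp [pvRecs0, hne]
      rw [hr]
      by_cases hid : id = ""
      · simp [hid, pvRecs0, pvFmt]
      · by_cases hseq : seq = [] <;>
          simp [hid, hseq, pvRecs0, pvFmt, pvEmit]
    · have hs' : PySem.Chars.startswith l.toList ['>'] = false := by
        simpa [PySem.Str.startswith] using hs
      have hA : pvStepA (acc, id, seq) l = (acc, id, seq ++ [PySem.Str.strip l]) := by
        simp [pvStepA, hs']
      have hB : pvStepRec (pvRecs0 id seq) l = pvRecs0 id (seq ++ [PySem.Str.strip l]) := by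
        by_cases hid : id = "" <;> simp [pvStepRec, hs', pvRecs0, hid]
      simp only [List.foldl_cons, hA, hB]
      exact ih acc id (seq ++ [PySem.Str.strip l])

-- ===== VERDICT (by name: the statement is the Claim_ definition above) =====
theorem replicate_sequences_spec : Claim_equal_replicate_sequences := by
  intro file_lines _
  unfold Spec_replicate_sequences replicate_sequences replicate_sequences_alt
  have := pv_main file_lines [] "" []
  simpa [pvRecs0, pvFmt] using this
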